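-- pv_equiv track=rewrite | github.com/miliar/Code_Jam_Webscraper | Solutions_in_python/Problem_199/GoogleJamPb1.py | flipSizePc
-- ===== SOURCE A (Python) =====
-- def flipSizePc(pcList, FlipperSize, start):
--     pcListNew = list(pcList)
--
--     for i in range(0, FlipperSize):
--         if pcList[i+start] == '+':
--             pcListNew[i+start] = '-'
--         else:
--             pcListNew[i+start] = '+'
--
--     return "".join(pcListNew)
-- ===== SOURCE B (Python) =====
-- def flipSizePc(pcList, FlipperSize, start):
--     end = start + FlipperSize
--     return "".join(('-' if c == '+' else '+') if start <= i < end else c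
--                    for i, c in enumerate(pcList))
-- ===== Notes on version B (the rewrite author's own statement) =====
-- stated objective: simpler
-- what changed: replaces A's copy-then-mutate loop over window indices (list copy plus per-index branch and assignment) by a single enumerate pass that maps each element according to a position test
-- outside the precondition, e.g. on flipSizePc(['+', '-'], 1, -1): A returns '++', B returns '+-'; on flipSizePc(['+', '-', '+'], 2, -1): A returns '---', B returns '--+'
import Mathlib
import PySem

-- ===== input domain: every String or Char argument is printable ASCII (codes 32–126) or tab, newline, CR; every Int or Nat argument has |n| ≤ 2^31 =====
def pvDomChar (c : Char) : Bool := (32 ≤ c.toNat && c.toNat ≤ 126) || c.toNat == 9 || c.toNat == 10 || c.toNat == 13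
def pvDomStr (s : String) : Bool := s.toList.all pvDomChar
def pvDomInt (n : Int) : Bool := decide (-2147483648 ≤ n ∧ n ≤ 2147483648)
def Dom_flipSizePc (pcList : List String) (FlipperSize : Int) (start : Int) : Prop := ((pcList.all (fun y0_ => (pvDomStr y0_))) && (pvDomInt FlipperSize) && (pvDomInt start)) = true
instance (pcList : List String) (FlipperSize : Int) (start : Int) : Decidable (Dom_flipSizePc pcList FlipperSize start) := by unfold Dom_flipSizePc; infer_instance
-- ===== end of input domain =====

-- B replaces A's copy-and-mutate loop over window indices by a single enumerate pass
-- that maps each element according to a position test (objective: simpler).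

-- ===== PORT A =====
def flipSizePc (pcList : List String) (FlipperSize : Int) (start : Int) : String :=
  let pcListNew := pcList
  let pcListNew :=
    (PySem.List.pyRange 0 FlipperSize 1).foldl
      (fun acc i =>
        if PySem.List.pyGetD pcList (i + start) "" = "+" then
          PySem.List.pySetD acc (i + start) "-"
        else
          PySem.List.pySetD acc (i + start) "+")
      pcListNew
  PySem.Str.join "" pcListNew

-- ===== PORT B =====
def flipSizePc_alt (pcList : List String) (FlipperSize : Int) (start : Int) : String :=
  let «end» := start + FlipperSize
  PySem.Str.join ""
    ((PySem.List.enumerate pcList 0).map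
      (fun p => if start ≤ p.1 ∧ p.1 < «end» then (if p.2 = "+" then "-" else "+") else p.2))

-- ===== PRECONDITION & SPEC =====
-- Pre_ excludes (a) windows that run outside the list, where A raises IndexError, and
-- (b) windows reached only through Python's negative-index wraparound (FlipperSize > 0
-- with start < 0), an accidental corner where A flips wrapped positions while B flips
-- the literal interval — both readings are defensible, neither is specified.
def Pre_flipSizePc (pcList : List String) (FlipperSize : Int) (start : Int) : Prop :=
  FlipperSize ≤ 0 ∨ (0 ≤ start ∧ start + FlipperSize ≤ pcList.length)
instance (pcList : List String) (FlipperSize : Int) (start : Int) : Decidable (Pre_flipSizePc pcList FlipperSize start) := by unfold Pre_flipSizePc; infer_instance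

def pvWitness_flipSizePc : List String × Int × Int := (["+", "-", "+", "+"], 2, 1)

def Spec_flipSizePc (pcList : List String) (FlipperSize : Int) (start : Int) (out : String) : Prop := out = flipSizePc_alt pcList FlipperSize start
instance (pcList : List String) (FlipperSize : Int) (start : Int) (out : String) : Decidable (Spec_flipSizePc pcList FlipperSize start out) := by unfold Spec_flipSizePc; infer_instance

-- ===== CLAIM (what is proved, stated in full; the proofs are below) =====
def Claim_equal_flipSizePc : Prop := ∀ (pcList : List String) (FlipperSize : Int) (start : Int), Dom_flipSizePc pcList FlipperSize start → Pre_flipSizePc pcList FlipperSize start → Spec_flipSizePc pcList FlipperSize start (flipSizePc pcList FlipperSize start)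

-- ===== LEMMAS AND PROOFS =====

-- the per-element flip A performs at each window index
def pvFlip (x : String) : String := if x = "+" then "-" else "+"

-- B's map with an empty window is the identity pass
lemma map_empty_window (xs : List String) (a b : Int) (hab : b ≤ a) :
    (PySem.List.enumerate xs 0).map
        (fun p => if a ≤ p.1 ∧ p.1 < b then pvFlip p.2 else p.2) = xs := by
  rw [List.map_congr_left (g := fun p => p.2), PySem.List.map_snd_enumerate]
  intro p hp
  rcases (PySem.List.mem_enumerate_iff _ _ _).1 hp with ⟨k, hk, rfl⟩
  simp only
  rw [if_neg (by omega)]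

-- core invariant: folding A's window writes over `List.set` produces exactly
-- B's position-tested map over the enumeration
lemma fold_flip_eq_map (xs : List String) (s f : Nat) (h : s + f ≤ xs.length) :
    (List.range f).foldl (fun acc k => acc.set (k + s) (pvFlip (xs.getD (k + s) ""))) xs
      = (PySem.List.enumerate xs 0).map
          (fun p => if (s : Int) ≤ p.1 ∧ p.1 < (s : Int) + (f : Int) then pvFlip p.2 else p.2) := by
  induction f with
  | zero =>
      simp only [List.range_zero, List.foldl_nil]
      exact (map_empty_window xs s s (by omega)).symm
  | succ f ih =>
      have hf : s + f ≤ xs.length := by omega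
      rw [List.range_succ, List.foldl_append, List.foldl_cons, List.foldl_nil, ih hf]
      apply List.ext_getElem
      · simp [PySem.List.length_enumerate]
      · intro k h1 h2
        have hk : k < xs.length := by
          simpa [PySem.List.length_enumerate] using h2
        rw [List.getElem_set]
        by_cases hfs : f + s = k
        · subst hfs
          rw [if_pos rfl, List.getElem_map, PySem.List.getElem_enumerate]
          simp only [Int.zero_add]
          rw [if_pos (by push_cast; omega), List.getD_eq_getElem _ _ hk]
        · rw [if_neg hfs, List.getElem_map, List.getElem_map,
            PySem.List.getElem_enumerate]
          dsimp only
          simp only [Int.zero_add]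
          by_cases hc : (s : Int) ≤ (k : Int) ∧ (k : Int) < (s : Int) + (f : Int)
          · rw [if_pos hc, if_pos (by push_cast at hc ⊢; omega)]
          · rw [if_neg hc, if_neg (by push_cast at hc ⊢; omega)]

-- ===== VERDICT (by name: the statement is the Claim_ definition above) =====
theorem flipSizePc_spec : Claim_equal_flipSizePc := by
  intro pcList F start _ hpre
  unfold Spec_flipSizePc flipSizePc flipSizePc_alt
  dsimp only
  by_cases hF : F ≤ 0
  · -- empty window: range is empty, B's test never fires
    rw [PySem.List.pyRange_one_eq_nil hF, List.foldl_nil]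
    congr 1
    exact (map_empty_window pcList start (start + F) (by omega)).symm
  · -- in-range window
    have hpos : 0 < F := by omega
    rcases hpre with h | ⟨hs, hlen⟩
    · omega
    obtain ⟨s, rfl⟩ : ∃ s : Nat, start = (s : Int) := ⟨start.toNat, (Int.toNat_of_nonneg hs).symm⟩
    obtain ⟨f, rfl⟩ : ∃ f : Nat, F = (f : Int) := ⟨F.toNat, (Int.toNat_of_nonneg (by omega)).symm⟩
    have hsf : s + f ≤ pcList.length := by exact_mod_cast hlen
    congr 1
    rw [PySem.List.pyRange_one, List.foldl_map]
    simp only [Int.sub_zero, Int.toNat_natCast]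
    have hfun : (fun (acc : List String) (k : Nat) =>
        (fun acc i =>
          if PySem.List.pyGetD pcList (i + (s : Int)) "" = "+" then
            PySem.List.pySetD acc (i + (s : Int)) "-"
          else
            PySem.List.pySetD acc (i + (s : Int)) "+") acc ((0 : Int) + (k : Int)))
        = fun acc k => acc.set (k + s) (pvFlip (pcList.getD (k + s) "")) := by
      funext acc k
      have hcast : (0 : Int) + (k : Int) + (s : Int) = ((k + s : Nat) : Int) := by push_cast; ring
      simp only [hcast, PySem.List.pyGetD_natCast, PySem.List.pySetD_natCast, pvFlip]
      split <;> rfl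
    rw [hfun, fold_flip_eq_map pcList s f hsf]
    simp only [pvFlip]
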